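-- pv_equiv track=rewrite | github.com/xraygui/nbs-bl | nbs_bl/tests/modify_regions.py | modify_region_array
-- ===== SOURCE A (Python) =====
-- def modify_region_array(region_list):
--     """
--     Modify a region array by swapping the order of energy and step values.
--
--     Parameters
--     ----------
--     region_list : list
--         List of alternating energy and step values
--
--     Returns
--     -------
--     list
--         Modified list with energy and step values reordered
--     """
--     if len(region_list) < 3:
--         return region_list  # Need at least 3 values to swap
--
--     # The pattern is: [energy1, energy2, step1, energy3, step2, ...]
--     # We want: [energy1, step1, energy2, step2, energy3, ...]
--
--     result = [region_list[0]]  # Keep first energy value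
--
--     # Process remaining values in pairs
--     for i in range(1, len(region_list) - 1, 2):
--         if i + 1 < len(region_list):
--             # Swap: energy, step -> step, energy
--             result.append(region_list[i + 1])  # step
--             result.append(region_list[i])  # energy
--
--     return result
-- ===== SOURCE B (Python) =====
-- def modify_region_array(region_list):
--     if len(region_list) < 3:
--         return region_list
--     energies = region_list[1::2]
--     steps = region_list[2::2]
--     result = [region_list[0]]
--     for step, energy in zip(steps, energies):
--         result.append(step)
--         result.append(energy)
--     return result
-- ===== Notes on version B (the rewrite author's own statement) =====
-- stated objective: idiomatic
-- what changed: Replaces A's index loop over range(1, len-1, 2) with guarded indexing by two strided slices (energies = lst[1::2], steps = lst[2::2]) zipped together, with zip's truncation giving the even-length tail drop.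
import Mathlib
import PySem

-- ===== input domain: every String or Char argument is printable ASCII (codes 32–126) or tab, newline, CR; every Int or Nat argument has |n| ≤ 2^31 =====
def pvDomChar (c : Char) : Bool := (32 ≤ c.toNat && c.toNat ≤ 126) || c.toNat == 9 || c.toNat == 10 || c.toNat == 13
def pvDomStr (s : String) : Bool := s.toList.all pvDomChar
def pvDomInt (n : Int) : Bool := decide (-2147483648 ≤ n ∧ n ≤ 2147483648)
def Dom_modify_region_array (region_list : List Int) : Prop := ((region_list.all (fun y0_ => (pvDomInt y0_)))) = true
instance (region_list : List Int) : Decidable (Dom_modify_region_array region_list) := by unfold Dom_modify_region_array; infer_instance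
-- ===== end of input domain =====

-- B replaces A's index loop over range(1, len-1, 2) by two strided slices zipped together; objective: idiomatic (no speed claim).

-- ===== PORT A =====
def modify_region_array (region_list : List Int) : List Int :=
  if region_list.length < 3 then region_list
  else
    (PySem.List.pyRange 1 ((region_list.length : Int) - 1) 2).foldl
      (fun result i =>
        if i + 1 < (region_list.length : Int) then
          (result ++ [PySem.List.pyGetD region_list (i + 1) 0]) ++ [PySem.List.pyGetD region_list i 0]
        else result)
      [PySem.List.pyGetD region_list 0 0]

-- ===== PORT B =====
def modify_region_array_alt (region_list : List Int) : List Int :=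
  if region_list.length < 3 then region_list
  else
    let energies := (PySem.List.slice? region_list (some 1) none 2).getD []   -- step 2 ≠ 0, so slice? is `some`
    let steps := (PySem.List.slice? region_list (some 2) none 2).getD []
    (steps.zip energies).foldl
      (fun result p => (result ++ [p.1]) ++ [p.2])
      [PySem.List.pyGetD region_list 0 0]

-- ===== PRECONDITION & SPEC =====
def Spec_modify_region_array (region_list : List Int) (out : List Int) : Prop := out = modify_region_array_alt region_list
instance (region_list : List Int) (out : List Int) : Decidable (Spec_modify_region_array region_list out) := by unfold Spec_modify_region_array; infer_instance

-- ===== CLAIM (what is proved, stated in full; the proofs are below) =====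
def Claim_equal_modify_region_array : Prop := ∀ (region_list : List Int), Dom_modify_region_array region_list → Spec_modify_region_array region_list (modify_region_array region_list)

-- ===== LEMMAS AND PROOFS =====

-- a forward slice with step 2 starting at s is a map over a range of indices
theorem pv_slice_two (rl : List Int) (s : Nat) (h1 : 1 ≤ s) (h2 : s ≤ rl.length) :
    PySem.List.slice? rl (some (s : Int)) none 2
      = some ((List.range ((((rl.length : Int) - s + 1) / 2).toNat)).map
          (fun (k : Nat) => PySem.List.pyGetD rl ((s : Int) + 2 * (k : Int)) 0)) := by
  have hlen : ((s:Int)) ≤ (rl.length : Int) := by exact_mod_cast h2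
  simp only [PySem.List.slice?, PySem.List.sliceIndices]
  norm_num [min_eq_left hlen]
  rw [if_neg (by omega : ¬ ((s:Int)) < 0)]
  rw [show (if (s:Int) < (rl.length:Int) then (((rl.length:Int) - s + 2 - 1) / 2).toNat else 0)
        = ((((rl.length : Int) - s + 1) / 2).toNat) from by split_ifs <;> omega]
  rw [List.filterMap_congr (g := fun (k : Nat) =>
        some (PySem.List.pyGetD rl ((s : Int) + 2 * (k : Int)) 0)) ?_]
  · exact List.filterMap_eq_map ▸ rfl
  · intro k hk
    rw [List.mem_range] at hk
    have hki : (k : Int) < ((rl.length : Int) - s + 1) / 2 := by omega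
    have hik : ((s : Int)) + 2 * (k : Int) < (rl.length : Int) := by omega
    have hidx : (((s:Int)) + 2 * (k:Int)).toNat < rl.length := by omega
    have hpg := PySem.List.pyGetD_eq_getElem rl (i := (s:Int) + 2 * (k:Int)) 0 (by omega) (by omega)
    simp [hpg, List.getElem?_eq_getElem hidx]

-- zipping two maps over ranges truncates to the shorter range
theorem pv_zip_map_range (c : Nat) : ∀ (m : Nat) (hs he : Nat → Int), c ≤ m →
    ((List.range c).map hs).zip ((List.range m).map he)
      = (List.range c).map (fun k => (hs k, he k)) := by
  induction c with
  | zero => intro m hs he _; simp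
  | succ c ih =>
    intro m hs he hcm
    obtain ⟨m', rfl⟩ : ∃ m', m = m' + 1 := ⟨m - 1, by omega⟩
    rw [List.range_succ_eq_map, List.range_succ_eq_map]
    simp only [List.map_cons, List.map_map, List.zip_cons_cons]
    rw [show ((List.range c).map (hs ∘ Nat.succ)).zip ((List.range m').map (he ∘ Nat.succ))
          = (List.range c).map (fun k => (hs (k + 1), he (k + 1))) from
        ih m' (hs ∘ Nat.succ) (he ∘ Nat.succ) (by omega)]
    simp [Function.comp]

theorem modify_region_array_spec : Claim_equal_modify_region_array := by
  intro rl _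
  unfold Spec_modify_region_array modify_region_array modify_region_array_alt
  by_cases h3 : rl.length < 3
  · simp [h3]
  · simp only [if_neg h3]
    have hn : 3 ≤ rl.length := by omega
    -- B side: compute the two slices
    rw [show PySem.List.slice? rl (some 2) none 2
          = some ((List.range ((((rl.length : Int) - (2:Nat) + 1) / 2).toNat)).map
              (fun (k : Nat) => PySem.List.pyGetD rl (((2:Nat) : Int) + 2 * (k : Int)) 0)) from
        pv_slice_two rl 2 (by omega) (by omega)]
    rw [show PySem.List.slice? rl (some 1) none 2
          = some ((List.range ((((rl.length : Int) - (1:Nat) + 1) / 2).toNat)).map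
              (fun (k : Nat) => PySem.List.pyGetD rl (((1:Nat) : Int) + 2 * (k : Int)) 0)) from
        pv_slice_two rl 1 (by omega) (by omega)]
    simp only [Option.getD_some]
    rw [pv_zip_map_range _ _ _ _ (by omega)]
    rw [PySem.List.foldl_congr_mem _ _
        (fun (res : List Int) (p : Int × Int) => res ++ [p.1, p.2]) _ (by intro acc p _; simp)]
    rw [PySem.List.foldl_append_eq_flatMap]
    -- A side: drop the always-true guard, turn the fold into a flatMap
    rw [PySem.List.foldl_congr_mem _ _
        (fun res i => res ++ [PySem.List.pyGetD rl (i + 1) 0, PySem.List.pyGetD rl i 0]) _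
        (by
          intro acc i hi
          rw [PySem.List.mem_pyRange_iff_of_pos (by norm_num)] at hi
          rw [if_pos (by omega)]
          simp)]
    rw [PySem.List.foldl_append_eq_flatMap]
    rw [PySem.List.pyRange_of_pos 1 ((rl.length : Int) - 1) (by norm_num)]
    rw [if_pos (by omega)]
    rw [List.flatMap_map, List.flatMap_map]
    rw [show ((((rl.length : Int) - 1 - 1 + 2 - 1) / 2).toNat)
          = ((((rl.length : Int) - (2:Nat) + 1) / 2).toNat) by omega]
    congr 1
    refine congrFun (congrArg List.flatMap (funext fun k => ?_)) _
    simp only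
    rw [show (1 : Int) + 2 * (k : Int) + 1 = ((2:Nat) : Int) + 2 * (k : Int) by push_cast; ring,
        show (1 : Int) + 2 * (k : Int) = ((1:Nat) : Int) + 2 * (k : Int) by push_cast; ring]

-- ===== VERDICT (by name: the statement is the Claim_ definition above) =====
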